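-- pv_equiv track=rewrite | github.com/HugoPauthier/aoc2021 | days/13/part1.py | get_dots
-- ===== SOURCE A (Python) =====
-- def get_dots(data):
--     dots = []
--     max_x = 0
--     max_y = 0
--     for i in range(0, len(data)):
--         current = data[i]
--         if current == "":
--             return dots, max_x, max_y, i
--         dot_split = [int(x) for x in current.split(",")]
--         if dot_split[0] > max_x:
--             max_x = dot_split[0]
--         if dot_split[1] > max_y:
--             max_y = dot_split[1]
--         dots.append(dot_split)
-- ===== SOURCE B (Python) =====
-- def get_dots(data):
--     i = data.index("")
--     dots = [[int(x) for x in line.split(",")] for line in data[:i]]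
--     max_x = max([0] + [d[0] for d in dots])
--     max_y = max([0] + [d[1] for d in dots])
--     return dots, max_x, max_y, i
-- ===== Notes on version B (the rewrite author's own statement) =====
-- stated objective: simpler
-- what changed: B replaces A's single indexed loop with inline running-max bookkeeping by a find-index-of-blank-line, a parse of the slice before it via a comprehension, and two separate max reductions with an explicit 0 floor.
-- outside the precondition, e.g. on get_dots(['1,2']): A returns None, B raises ValueError
import Mathlib
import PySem

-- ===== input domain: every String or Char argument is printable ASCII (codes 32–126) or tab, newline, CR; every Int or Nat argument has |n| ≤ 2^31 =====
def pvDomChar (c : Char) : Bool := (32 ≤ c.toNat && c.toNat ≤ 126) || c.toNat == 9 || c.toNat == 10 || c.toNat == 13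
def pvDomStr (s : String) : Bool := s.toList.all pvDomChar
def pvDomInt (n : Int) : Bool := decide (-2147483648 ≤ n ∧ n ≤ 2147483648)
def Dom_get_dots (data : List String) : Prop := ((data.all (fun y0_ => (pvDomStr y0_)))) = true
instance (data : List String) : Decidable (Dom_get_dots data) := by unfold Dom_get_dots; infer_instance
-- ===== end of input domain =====

-- B replaces A's single indexed loop with inline running-max bookkeeping by: find the first
-- blank line's index, parse the slice before it, then two separate max reductions (simpler decomposition).

-- ===== PORT A =====
-- [int(x) for x in current.split(",")]  (sep "," is nonempty, so split? is always `some`)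
def pvParseA (line : String) : List Int :=
  ((PySem.Str.split? line ",").getD []).map (fun x => (PySem.Int.ofStr? x).getD 0)

-- the indexed for-loop of A as structural recursion over the remaining lines;
-- state (i, dots, max_x, max_y) exactly as in A.  Falling off the loop is Python's
-- implicit `return None` (no value of the declared type): excluded by Pre_, junk here.
def pvGoA : List String → Int → List (List Int) → Int → Int → List (List Int) × Int × Int × Int
  | [], i, dots, mx, my => (dots, mx, my, i)
  | cur :: rest, i, dots, mx, my =>
    if cur = "" then (dots, mx, my, i)
    else
      let ds := pvParseA cur
      let mx' := if PySem.List.pyGetD ds 0 0 > mx then PySem.List.pyGetD ds 0 0 else mx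
      let my' := if PySem.List.pyGetD ds 1 0 > my then PySem.List.pyGetD ds 1 0 else my
      pvGoA rest (i + 1) (dots ++ [ds]) mx' my'

def get_dots (data : List String) : List (List Int) × Int × Int × Int :=
  pvGoA data 0 [] 0 0

-- ===== PORT B =====
def pvParseB (line : String) : List Int :=
  ((PySem.Str.split? line ",").getD []).map (fun x => (PySem.Int.ofStr? x).getD 0)

-- data.index("") raising ValueError (no blank line) is excluded by Pre_: junk there.
def get_dots_alt (data : List String) : List (List Int) × Int × Int × Int :=
  match PySem.List.index? data "" with
  | none => ([], 0, 0, 0)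
  | some i =>
    let dots := (PySem.List.slice data none (some (i : Int))).map pvParseB
    let max_x := (PySem.List.max? ((0 : Int) :: dots.map (fun d => PySem.List.pyGetD d 0 0)) (fun y => y)).getD 0
    let max_y := (PySem.List.max? ((0 : Int) :: dots.map (fun d => PySem.List.pyGetD d 1 0)) (fun y => y)).getD 0
    (dots, max_x, max_y, (i : Int))

-- ===== PRECONDITION & SPEC =====
-- Pre_ excludes: inputs with no blank line (A returns None, not a value of the declared
-- type) and inputs where some line before the first blank line is not a comma-separated
-- list of at least two Python ints (A raises ValueError/IndexError there).
def Pre_get_dots (data : List String) : Prop :=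
  "" ∈ data ∧
  ∀ line ∈ data.takeWhile (fun l => l ≠ ""),
    2 ≤ ((PySem.Str.split? line ",").getD []).length ∧
    ∀ p ∈ (PySem.Str.split? line ",").getD [], (PySem.Int.ofStr? p).isSome = true
instance (data : List String) : Decidable (Pre_get_dots data) := by unfold Pre_get_dots; infer_instance

def pvWitness_get_dots : List String := ["6,10", "0,14", "", "fold along y=7"]

def Spec_get_dots (data : List String) (out : List (List Int) × Int × Int × Int) : Prop := out = get_dots_alt data
instance (data : List String) (out : List (List Int) × Int × Int × Int) : Decidable (Spec_get_dots data out) := by unfold Spec_get_dots; infer_instance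

-- ===== CLAIM (what is proved, stated in full; the proofs are below) =====
def Claim_equal_get_dots : Prop := ∀ (data : List String), Dom_get_dots data → Pre_get_dots data → Spec_get_dots data (get_dots data)

-- ===== LEMMAS AND PROOFS =====

lemma max_ite (m d : Int) : (if d > m then d else m) = max m d := by
  split_ifs <;> omega

-- A's loop, run to the first blank line, in closed form over takeWhile.
lemma pvGoA_spec (data : List String) (h : "" ∈ data) :
    ∀ (i : Int) (dots : List (List Int)) (mx my : Int),
    pvGoA data i dots mx my =
      (dots ++ (data.takeWhile (fun l => l ≠ "")).map pvParseA,
       (data.takeWhile (fun l => l ≠ "")).foldl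
         (fun m l => max m (PySem.List.pyGetD (pvParseA l) 0 0)) mx,
       (data.takeWhile (fun l => l ≠ "")).foldl
         (fun m l => max m (PySem.List.pyGetD (pvParseA l) 1 0)) my,
       i + ((data.takeWhile (fun l => l ≠ "")).length : Int)) := by
  induction data with
  | nil => cases h
  | cons cur rest ih =>
    intro i dots mx my
    by_cases hc : cur = ""
    · subst hc
      simp [pvGoA, List.takeWhile]
    · have hmem : "" ∈ rest := by
        rcases List.mem_cons.mp h with h' | h'
        · exact absurd h'.symm hc
        · exact h'
      have htw : (cur :: rest).takeWhile (fun l => l ≠ "") =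
          cur :: rest.takeWhile (fun l => l ≠ "") :=
        List.takeWhile_cons_of_pos (by simp [hc])
      rw [show pvGoA (cur :: rest) i dots mx my =
            pvGoA rest (i + 1) (dots ++ [pvParseA cur])
              (if PySem.List.pyGetD (pvParseA cur) 0 0 > mx then PySem.List.pyGetD (pvParseA cur) 0 0 else mx)
              (if PySem.List.pyGetD (pvParseA cur) 1 0 > my then PySem.List.pyGetD (pvParseA cur) 1 0 else my)
          from by simp [pvGoA, hc]]
      rw [ih hmem, htw, max_ite, max_ite]
      simp only [List.map_cons, List.foldl_cons, List.length_cons]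
      refine Prod.ext (by simp) (Prod.ext rfl (Prod.ext rfl ?_))
      push_cast
      omega

lemma pvIndex_takeWhile (data : List String) (h : "" ∈ data) :
    PySem.List.index? data "" = some (data.takeWhile (fun l => l ≠ "")).length ∧
    data.take (data.takeWhile (fun l => l ≠ "")).length = data.takeWhile (fun l => l ≠ "") := by
  induction data with
  | nil => cases h
  | cons cur rest ih =>
    by_cases hc : cur = ""
    · subst hc
      rw [PySem.List.index?_cons_self]
      simp [List.takeWhile]
    · have hmem : "" ∈ rest := by
        rcases List.mem_cons.mp h with h' | h'
        · exact absurd h'.symm hc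
        · exact h'
      obtain ⟨h1, h2⟩ := ih hmem
      have htw : (cur :: rest).takeWhile (fun l => l ≠ "") =
          cur :: rest.takeWhile (fun l => l ≠ "") :=
        List.takeWhile_cons_of_pos (by simp [hc])
      rw [htw]
      constructor
      · rw [PySem.List.index?_cons_of_ne rest hc, h1]
        simp
      · simp only [List.length_cons, List.take_succ_cons, h2]

-- ===== VERDICT (by name: the statement is the Claim_ definition above) =====
theorem get_dots_spec : Claim_equal_get_dots := by
  intro data _ hpre
  obtain ⟨hmem, -⟩ := hpre
  show get_dots data = get_dots_alt data
  obtain ⟨hidx, htake⟩ := pvIndex_takeWhile data hmem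
  unfold get_dots get_dots_alt
  rw [hidx]
  simp only [PySem.List.slice_to_natCast, htake]
  rw [pvGoA_spec data hmem]
  simp only [PySem.List.max?_id_cons, Option.getD_some, List.foldl_map, List.map_map,
    List.nil_append, zero_add, Function.comp_def]
  rfl
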